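-- pv_equiv track=rewrite | github.com/IvanRenison/ProgrammingProblems | ICPC contests/Brazil Subregional 2024-2025/H.py | solve
-- ===== SOURCE A (Python) =====
-- def solve(M: list[str], N: list[str]) -> int:
--
--   M_missing: list[int] = []
--   for i, c in enumerate(M):
--     if c == '*':
--       M_missing.append(i)
--   N_missing: list[int] = []
--   for i, c in enumerate(N):
--     if c == '*':
--       N_missing.append(i)
--
--   for x in range(1 << len(M_missing)):
--     M_ = M
--     for i in range(len(M_missing)):
--       if x & (1 << i):
--         M_[M_missing[i]] = '1'
--       else:
--         M_[M_missing[i]] = '0'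
--     M_int: int = 0
--     for i, c in enumerate(M_):
--       M_int <<= 1
--       if c == '1':
--         M_int += 1
--
--     for x in range(1 << len(N_missing)):
--       N_ = N
--       for i in range(len(N_missing)):
--         if x & (1 << i):
--           N_[N_missing[i]] = '1'
--         else:
--           N_[N_missing[i]] = '0'
--       N_int: int = 0
--       for i, c in enumerate(N_):
--         N_int <<= 1
--         if c == '1':
--           N_int += 1
--
--       if M_int % N_int == 0:
--         return M_int
--
--   assert(False)
-- ===== SOURCE B (Python) =====
-- # B: per-divisor residue DP instead of brute-forcing M fills. For each N fill
-- # value n, a dict residue -> minimal fill index x is grown one wildcard bit at a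
-- # time; the global minimal x over all n picks the answer, so M's 2^a fills are
-- # never enumerated against every n. (A mutates its list arguments in place; B
-- # does not — equivalence is about the return value.)
-- def solve(M: list[str], N: list[str]) -> int:
--
--   def parts(L: list[str]) -> tuple[int, list[int]]:
--     base = 0
--     mw: list[int] = []
--     for i, c in enumerate(L):
--       w = 1 << (len(L) - 1 - i)
--       if c == '1':
--         base += w
--       elif c == '*':
--         mw.append(w)
--     return base, mw
--
--   def min_x(base: int, mw: list[int], n: int) -> int | None:
--     # dp: residue of the partial fill value mod n -> minimal x producing it
--     dp = {0: 0}
--     for j, w in enumerate(mw):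
--       ndp = dict(dp)
--       for r, x in dp.items():
--         r2 = (r + w) % n
--         x2 = x + (1 << j)
--         old = ndp.get(r2)
--         if old is None or x2 < old:
--           ndp[r2] = x2
--       dp = ndp
--     return dp.get((-base) % n)
--
--   Nbase, Nmw = parts(N)
--   N_vals = [Nbase]
--   for w in reversed(Nmw):
--     N_vals = [u for v in N_vals for u in (v, v + w)]
--
--   Mbase, Mmw = parts(M)
--   best = None
--   for n in N_vals:
--     x = min_x(Mbase, Mmw, n)
--     if x is not None and (best is None or x < best):
--       best = x
--   assert best is not None
--
--   v = Mbase
--   for j, w in enumerate(Mmw):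
--     if best >> j & 1:
--       v += w
--   return v
-- ===== Notes on version B (the rewrite author's own statement) =====
-- stated objective: alternative
-- what changed: B never enumerates the M fills: for each N fill value n it runs a residue dynamic programme (dict residue-mod-n -> minimal fill index x, extended one wildcard bit at a time) and returns the value at the minimal x over all n, whereas A brute-forces every (M fill, N fill) pair rebuilding and reparsing the strings.
import Mathlib
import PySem

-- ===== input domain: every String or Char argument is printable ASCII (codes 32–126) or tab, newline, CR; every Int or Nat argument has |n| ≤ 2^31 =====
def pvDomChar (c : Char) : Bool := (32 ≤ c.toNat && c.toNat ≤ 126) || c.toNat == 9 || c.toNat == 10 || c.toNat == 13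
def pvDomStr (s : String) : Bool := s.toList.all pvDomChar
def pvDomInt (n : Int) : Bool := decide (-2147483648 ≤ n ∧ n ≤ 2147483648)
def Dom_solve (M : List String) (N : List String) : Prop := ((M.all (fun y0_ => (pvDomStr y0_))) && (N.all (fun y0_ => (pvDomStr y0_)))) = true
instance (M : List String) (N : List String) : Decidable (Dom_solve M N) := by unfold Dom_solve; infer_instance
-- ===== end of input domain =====

-- B replaces A's brute force over all M fills by, per N fill value n, a residue
-- dynamic programme (dict residue mod n -> minimal fill index) plus a global min;
-- return values agree (A mutates its list arguments in place, B does not — the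
-- equivalence proved here is about the return value only).

-- ===== PORT A =====
-- 'for i, c in enumerate(L): if c == '*': missing.append(i)' — enumerate indices are the
-- nonnegative list positions, ported as Nat via zipIdx (exact here).
def starsOf (L : List String) : List Nat :=
  L.zipIdx.foldl (fun acc p => if p.1 = "*" then acc ++ [p.2] else acc) []

-- 'M_int <<= 1; if c == '1': M_int += 1'
def pyToInt (L : List String) : Int :=
  L.foldl (fun a c => if c = "1" then 2 * a + 1 else 2 * a) 0

-- 'for i in range(len(missing)): L[missing[i]] = '1' if x & (1 << i) else '0''
-- ('x & (1 << i)' nonzero is exactly 'x.testBit i').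
def fillA (cur : List String) (missing : List Nat) (x : Nat) : List String :=
  (missing.zipIdx).foldl (fun L p => L.set p.1 (if x.testBit p.2 then "1" else "0")) cur

-- the inner 'for x in range(1 << len(N_missing))' loop, threading the mutated N list
def innerA (Mint : Int) (Nmiss : List Nat) : List Nat → List String → Option Int × List String
  | [], Ncur => (none, Ncur)
  | x :: xs, Ncur =>
    let N_ := fillA Ncur Nmiss x
    if PySem.Int.mod Mint (pyToInt N_) = 0 then (some Mint, N_)
    else innerA Mint Nmiss xs N_

-- the outer 'for x in range(1 << len(M_missing))' loop, threading both mutated lists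
def outerA (Mmiss Nmiss : List Nat) : List Nat → List String → List String → Int
  | [], _, _ => 0  -- 'assert(False)': Python raises here; excluded by Pre_solve
  | x :: xs, Mcur, Ncur =>
    let M_ := fillA Mcur Mmiss x
    let Mint := pyToInt M_
    match innerA Mint Nmiss (List.range (2 ^ Nmiss.length)) Ncur with
    | (some r, _) => r
    | (none, N') => outerA Mmiss Nmiss xs M_ N'

def solve (M : List String) (N : List String) : Int :=
  outerA (starsOf M) (starsOf N) (List.range (2 ^ (starsOf M).length)) M N

-- ===== PORT B =====
-- parts(L): one pass collecting base (the '1' weights) and mw (the '*' weights);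
-- enumerate ported via zipIdx, '1 << e' written 2 ^ e (exact on Nat e).
def partsB (L : List String) : Int × List Int :=
  L.zipIdx.foldl (fun p q =>
    let w : Int := 2 ^ (L.length - 1 - q.2)
    if q.1 = "1" then (p.1 + w, p.2)
    else if q.1 = "*" then (p.1, p.2 ++ [w]) else p) (0, [])

-- one round of min_x's 'for r, x in dp.items(): …' loop: ndp starts as the copy
-- dict(dp) and is updated while the OLD dp's items are iterated.
def minxStep (n : Int) (dp : PySem.Dict Int Nat) (j : Nat) (w : Int) : PySem.Dict Int Nat :=
  dp.items.foldl (fun ndp rx =>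
    let r2 := PySem.Int.mod (rx.1 + w) n
    let x2 := rx.2 + 2 ^ j
    match ndp.get? r2 with
    | none => ndp.insert r2 x2
    | some old => if x2 < old then ndp.insert r2 x2 else ndp) dp

-- min_x(base, mw, n): 'dp = {0: 0}; for j, w in enumerate(mw): …; return dp.get((-base) % n)'
def minxB (base : Int) (mw : List Int) (n : Int) : Option Nat :=
  (mw.zipIdx.foldl (fun dp q => minxStep n dp q.2 q.1) (PySem.Dict.empty.insert 0 0)).get?
    (PySem.Int.mod (-base) n)

-- 'best >> j & 1' nonzero is exactly 'best.testBit j'.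
def solve_alt (M : List String) (N : List String) : Int :=
  let pN := partsB N
  let Nvals := pN.2.reverse.foldl (fun vs w => vs.flatMap (fun v => [v, v + w])) [pN.1]
  let pM := partsB M
  let best := Nvals.foldl (fun b n =>
    match minxB pM.1 pM.2 n with
    | none => b
    | some x =>
      match b with
      | none => some x
      | some b0 => if x < b0 then some x else some b0) none
  match best with
  | none => 0  -- 'assert best is not None' raises here; excluded by Pre_solve
  | some x => pM.2.zipIdx.foldl (fun v q => if x.testBit q.2 then v + q.1 else v) pM.1

-- ===== PRECONDITION & SPEC =====
-- Spec-side value functions used only by Pre_solve (they are not part of either port):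
-- weightsB n = the bit weights of an n-character string, fvB L x = the integer value of
-- the fill of L whose wildcard bits are the bits of x, valsB L = all fill values in
-- Python's enumeration order.
def weightsB (n : Nat) : List Int := (List.range n).map (fun i => (2 : Int) ^ (n - 1 - i))
def baseB (L : List String) : Int :=
  ((L.zipIdx.filter (fun p => p.1 = "1")).map (fun p => (weightsB L.length).getD p.2 0)).sum
def mwB (L : List String) : List Int :=
  (L.zipIdx.filter (fun p => p.1 = "*")).map (fun p => (weightsB L.length).getD p.2 0)
def fvB (L : List String) (x : Nat) : Int :=
  baseB L + (((List.range (mwB L).length).filter (fun j => x.testBit j)).map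
    (fun j => (mwB L).getD j 0)).sum
def valsB (L : List String) : List Int := (List.range (2 ^ (mwB L).length)).map (fvB L)

-- Pre_solve holds exactly where the Python A returns: N must contain a literal "1"
-- (otherwise the all-zero N fill is 0 and A raises ZeroDivisionError on the first inner
-- iteration), and some M fill must be divisible by some N fill (otherwise A falls through
-- to 'assert(False)', an AssertionError).
def Pre_solve (M : List String) (N : List String) : Prop :=
  "1" ∈ N ∧ ∃ m ∈ valsB M, ∃ n ∈ valsB N, n ∣ m
instance (M : List String) (N : List String) : Decidable (Pre_solve M N) := by
  unfold Pre_solve; infer_instance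
def pvWitness_solve : List String × List String := (["1", "*"], ["1"])

def Spec_solve (M : List String) (N : List String) (out : Int) : Prop := out = solve_alt M N
instance (M : List String) (N : List String) (out : Int) : Decidable (Spec_solve M N out) := by unfold Spec_solve; infer_instance

-- ===== CLAIM (what is proved, stated in full; the proofs are below) =====
def Claim_equal_solve : Prop := ∀ (M : List String) (N : List String), Dom_solve M N → Pre_solve M N → Spec_solve M N (solve M N)

-- ===== LEMMAS AND PROOFS =====

-- ---------- part 1: A computes the first hit of the fill-value enumeration ----------

-- 'for m in fills(M): if any(m % n == 0 for n in fills(N)): return m', as a recursion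
def firstHit (Nvals : List Int) : List Int → Int
  | [] => 0  -- A's 'assert(False)'; unreachable under Pre_solve
  | m :: ms => if Nvals.any (fun n => PySem.Int.mod m n = 0) then m else firstHit Nvals ms

-- cur agrees with L off the star positions and has the same length
def Compat (L cur : List String) : Prop :=
  cur.length = L.length ∧ ∀ i, i ∉ starsOf L → cur.getD i "" = L.getD i ""

-- positions of the elements equal to s, in increasing order
def posList (L : List String) (s : String) : List Nat :=
  (L.zipIdx.filter (fun p => p.1 = s)).map (fun p => p.2)

theorem starsOf_eq (L : List String) : starsOf L = posList L "*" := by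
  simp [starsOf, posList, PySem.List.foldl_append_ite]

theorem zipIdx_pairwise (L : List String) (k : Nat) :
    (L.zipIdx k).Pairwise (fun p q => p.2 < q.2) := by
  induction L generalizing k with
  | nil => simp
  | cons c L ih =>
    rw [List.zipIdx_cons]
    refine List.Pairwise.cons ?_ (ih (k+1))
    intro q hq
    have := List.mem_zipIdx (by exact hq)
    omega

theorem posList_pairwise (L : List String) (s : String) : (posList L s).Pairwise (· < ·) := by
  exact List.Pairwise.map _ (fun a b h => h) ((zipIdx_pairwise L 0).filter _)

theorem mem_posList (L : List String) (s : String) (i : Nat) :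
    i ∈ posList L s ↔ i < L.length ∧ L.getD i "" = s := by
  simp only [posList, List.mem_map, List.mem_filter]
  constructor
  · rintro ⟨⟨c, j⟩, ⟨hmem, hc⟩, rfl⟩
    have := List.mem_zipIdx hmem
    simp at hc
    obtain ⟨-, h2, h3⟩ := this
    refine ⟨by omega, ?_⟩
    rw [List.getD_eq_getElem?_getD]
    simp only [List.getElem?_eq_getElem (show j < L.length by omega), Option.getD_some]
    simp only [Nat.sub_zero] at h3
    rw [← h3]; exact hc
  · rintro ⟨h1, h2⟩
    refine ⟨(s, i), ⟨?_, by simp⟩, rfl⟩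
    have : L[i] = s := by
      rw [List.getD_eq_getElem?_getD, List.getElem?_eq_getElem h1] at h2
      simpa using h2
    rw [← this]
    simp [List.mem_zipIdx_iff_getElem?]

theorem mem_starsOf (L : List String) (i : Nat) :
    i ∈ starsOf L ↔ i < L.length ∧ L.getD i "" = "*" := by
  rw [starsOf_eq]; exact mem_posList L "*" i

theorem starsOf_pairwise (L : List String) : (starsOf L).Pairwise (· < ·) := by
  rw [starsOf_eq]; exact posList_pairwise L "*"

theorem mwB_eq (L : List String) :
    mwB L = (starsOf L).map (fun i => (weightsB L.length).getD i 0) := by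
  rw [starsOf_eq]
  simp [mwB, posList, List.map_map]

theorem baseB_eq (L : List String) :
    baseB L = ((posList L "1").map (fun i => (weightsB L.length).getD i 0)).sum := by
  simp only [baseB, posList, List.map_map]
  rfl

theorem weightsB_getD (n i : Nat) (hi : i < n) :
    (weightsB n).getD i 0 = (2 : Int) ^ (n - 1 - i) := by
  rw [weightsB, List.getD_eq_getElem?_getD, List.getElem?_map]
  simp [List.getElem?_range hi]

-- bitsum: the value of a string list under pyToInt, as a positional sum
def bitsum (L : List String) : Int :=
  ((List.range L.length).map
    (fun i => if L.getD i "" = "1" then (2 : Int) ^ (L.length - 1 - i) else 0)).sum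

theorem pyToInt_aux (L : List String) (a : Int) :
    L.foldl (fun a c => if c = "1" then 2 * a + 1 else 2 * a) a
      = a * 2 ^ L.length + pyToInt L := by
  induction L generalizing a with
  | nil => simp [pyToInt]
  | cons c L ih =>
    simp only [List.foldl_cons, pyToInt, List.length_cons]
    rw [ih, ih (if c = "1" then 2 * 0 + 1 else 2 * 0)]
    split_ifs <;> ring

theorem pyToInt_concat (L : List String) (c : String) :
    pyToInt (L ++ [c]) = 2 * pyToInt L + (if c = "1" then 1 else 0) := by
  unfold pyToInt
  rw [List.foldl_append]
  simp only [List.foldl_cons, List.foldl_nil]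
  rw [pyToInt_aux]
  split_ifs <;> simp [pyToInt]

theorem bitsum_concat (L : List String) (c : String) :
    bitsum (L ++ [c]) = 2 * bitsum L + (if c = "1" then 1 else 0) := by
  unfold bitsum
  simp only [List.length_append, List.length_cons, List.length_nil]
  rw [List.range_succ, List.map_append, List.sum_append]
  simp only [List.map_cons, List.map_nil, List.sum_cons, List.sum_nil]
  have hlast : (L ++ [c]).getD L.length "" = c := by
    rw [List.getD_eq_getElem?_getD, List.getElem?_concat_length]; rfl
  rw [hlast]
  have hmap : ((List.range L.length).map
      (fun i => if (L ++ [c]).getD i "" = "1" then (2 : Int) ^ (L.length + 1 - 1 - i) else 0))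
      = (List.range L.length).map
      (fun i => 2 * (if L.getD i "" = "1" then (2 : Int) ^ (L.length - 1 - i) else 0)) := by
    apply List.map_congr_left
    intro i hi
    rw [List.mem_range] at hi
    have h1 : (L ++ [c]).getD i "" = L.getD i "" := by
      rw [List.getD_eq_getElem?_getD, List.getD_eq_getElem?_getD,
        List.getElem?_append_left hi]
    rw [h1]
    split_ifs
    · rw [show L.length + 1 - 1 - i = (L.length - 1 - i) + 1 by omega, pow_succ]; ring
    · ring
  rw [hmap, List.sum_map_mul_left]
  simp only [Nat.add_sub_cancel, Nat.sub_self, pow_zero]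
  split_ifs <;> ring

theorem pyToInt_eq_bitsum (L : List String) : pyToInt L = bitsum L := by
  induction L using List.reverseRecOn with
  | nil => simp [pyToInt, bitsum]
  | append_singleton L c ih => rw [pyToInt_concat, bitsum_concat, ih]

theorem setFold_length (x : Nat) (ms : List Nat) (k : Nat) (cur : List String) :
    ((ms.zipIdx k).foldl (fun L p => L.set p.1 (if x.testBit p.2 then "1" else "0")) cur).length
      = cur.length := by
  induction ms generalizing k cur with
  | nil => rfl
  | cons a tl ih => rw [List.zipIdx_cons]; simp only [List.foldl_cons]; rw [ih]; simp

theorem setFold_getD_not_mem (x : Nat) (ms : List Nat) (k : Nat) (cur : List String)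
    (i : Nat) (hi : i ∉ ms) :
    ((ms.zipIdx k).foldl (fun L p => L.set p.1 (if x.testBit p.2 then "1" else "0")) cur).getD i ""
      = cur.getD i "" := by
  induction ms generalizing k cur with
  | nil => rfl
  | cons a tl ih =>
    rw [List.zipIdx_cons]; simp only [List.foldl_cons]
    rw [ih _ _ (by simp at hi; exact hi.2)]
    rw [List.getD_eq_getElem?_getD, List.getD_eq_getElem?_getD,
      List.getElem?_set_ne (by simp at hi; omega)]

theorem setFold_getD_mem (x : Nat) (ms : List Nat) (k : Nat) (cur : List String)
    (hnd : ms.Nodup) (hlt : ∀ m ∈ ms, m < cur.length)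
    (j : Nat) (hj : j < ms.length) :
    ((ms.zipIdx k).foldl (fun L p => L.set p.1 (if x.testBit p.2 then "1" else "0")) cur).getD
        ms[j] ""
      = (if x.testBit (k + j) then "1" else "0") := by
  induction ms generalizing k cur j with
  | nil => simp at hj
  | cons a tl ih =>
    rw [List.zipIdx_cons]; simp only [List.foldl_cons]
    rcases j with _ | j
    · simp only [List.getElem_cons_zero, Nat.add_zero]
      rw [setFold_getD_not_mem x tl (k+1) _ a (by simp at hnd; exact hnd.1)]
      rw [List.getD_eq_getElem?_getD,
        List.getElem?_set_self (by exact hlt a (by simp))]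
      rfl
    · simp only [List.getElem_cons_succ]
      rw [ih (k+1) _ (by simp at hnd; exact hnd.2)
        (fun m hm => by simpa using hlt m (by simp [hm])) j (by simpa using hj)]
      rw [show k + 1 + j = k + (j + 1) by omega]

-- list-range sums as Finset.range sums
theorem sum_range_list (n : Nat) (f : Nat → Int) :
    ((List.range n).map f).sum = ∑ i ∈ Finset.range n, f i := rfl

-- a sum over range n restricted to a sorted position list is the sum over that list
theorem sum_ite_mem_posns (n : Nat) (P : List Nat) (hnd : P.Nodup)
    (hsub : ∀ i ∈ P, i < n) (g : Nat → Int) :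
    (∑ i ∈ Finset.range n, if i ∈ P then g i else 0) = (P.map g).sum := by
  rw [← Finset.sum_filter]
  have : (Finset.range n).filter (· ∈ P) = P.toFinset := by
    ext i
    simp only [Finset.mem_filter, Finset.mem_range, List.mem_toFinset]
    exact ⟨fun h => h.2, fun h => ⟨hsub i h, h⟩⟩
  rw [this, List.sum_toFinset g hnd]

-- sum of a filtered-and-mapped list as an ite-sum
theorem filter_map_sum {α : Type} (l : List α) (p : α → Bool) (h : α → Int) :
    ((l.filter p).map h).sum = (l.map (fun a => if p a then h a else 0)).sum := by
  induction l with
  | nil => rfl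
  | cons a tl ih =>
    by_cases hp : p a <;> simp [hp, ih]

theorem getD_map_posns (P : List Nat) (g : Nat → Int) (j : Nat) (hj : j < P.length) :
    (P.map g).getD j 0 = g P[j] := by
  rw [List.getD_eq_getElem?_getD, List.getElem?_map, List.getElem?_eq_getElem hj]
  rfl

-- the central value lemma: filling the star positions of any compatible current list
-- with the bits of x yields exactly the spec table value fvB L x
theorem fillVal (L cur : List String) (x : Nat) (hc : Compat L cur) :
    pyToInt (fillA cur (starsOf L) x) = fvB L x := by
  obtain ⟨hlen, hoff⟩ := hc
  set n := L.length with hn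
  set miss := starsOf L with hmiss
  have hnd : miss.Nodup := (starsOf_pairwise L).nodup
  have hsub : ∀ m ∈ miss, m < n := fun m hm => ((mem_starsOf L m).mp hm).1
  have hsubc : ∀ m ∈ miss, m < cur.length := fun m hm => by rw [hlen]; exact hsub m hm
  set F := fillA cur miss x with hF
  have hFlen : F.length = n := by rw [hF, fillA, setFold_length, hlen]
  -- F's entries
  have hFoff : ∀ i, i ∉ miss → F.getD i "" = L.getD i "" := by
    intro i hi
    rw [hF, fillA, setFold_getD_not_mem x miss 0 cur i hi]
    exact hoff i hi
  have hFmem : ∀ j (hj : j < miss.length),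
      F.getD miss[j] "" = (if x.testBit j then "1" else "0") := by
    intro j hj
    rw [hF, fillA, setFold_getD_mem x miss 0 cur hnd hsubc j hj]
    simp
  -- expand pyToInt F as a positional sum and split it over star membership
  rw [pyToInt_eq_bitsum, bitsum, hFlen, sum_range_list]
  have hsplit :
      (∑ i ∈ Finset.range n, if F.getD i "" = "1" then (2:Int) ^ (n - 1 - i) else 0)
        = (∑ i ∈ Finset.range n,
            if L.getD i "" = "1" then (2:Int) ^ (n - 1 - i) else 0)
          + (∑ i ∈ Finset.range n,
            if i ∈ miss then (if F.getD i "" = "1" then (2:Int) ^ (n - 1 - i) else 0) else 0) := by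
    rw [← Finset.sum_add_distrib]
    apply Finset.sum_congr rfl
    intro i hi
    rw [Finset.mem_range] at hi
    by_cases hm : i ∈ miss
    · have h9 : L.getD i "" = "*" := ((mem_starsOf L i).mp (hmiss ▸ hm)).2
      rw [h9, if_pos hm, if_neg (by decide : ¬("*":String) = "1")]
      ring
    · rw [hFoff i hm, if_neg hm]
      ring
  rw [hsplit]
  congr 1
  · -- the base part
    have hones : ∀ i, i < n → (L.getD i "" = "1" ↔ i ∈ posList L "1") := by
      intro i hi
      rw [mem_posList]
      exact ⟨fun h => ⟨hi, h⟩, fun h => h.2⟩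
    rw [baseB_eq]
    rw [← sum_ite_mem_posns n (posList L "1") (posList_pairwise L "1").nodup
      (fun i hi => ((mem_posList L "1" i).mp hi).1)
      (fun i => (weightsB n).getD i 0)]
    apply Finset.sum_congr rfl
    intro i hi
    rw [Finset.mem_range] at hi
    by_cases h1 : L.getD i "" = "1"
    · rw [if_pos h1, if_pos ((hones i hi).mp h1), weightsB_getD n i hi]
    · rw [if_neg h1, if_neg (fun hmem => h1 ((hones i hi).mpr hmem))]
  · -- the missing-bits part
    rw [sum_ite_mem_posns n miss hnd hsub]
    rw [filter_map_sum]
    have hk : (mwB L).length = miss.length := by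
      rw [mwB_eq, List.length_map, ← hmiss]
    rw [hk]
    have : (List.range miss.length).map
        (fun j => if x.testBit j then (mwB L).getD j 0 else 0)
        = miss.map (fun i => if F.getD i "" = "1" then (2:Int) ^ (n - 1 - i) else 0) := by
      apply List.ext_getElem (by simp)
      intro j h1 h2
      simp only [List.getElem_map, List.getElem_range]
      have hj : j < miss.length := by simpa using h1
      have hmw : (mwB L).getD j 0 = (weightsB n).getD miss[j] 0 := by
        rw [mwB_eq]
        exact getD_map_posns miss _ j hj
      rw [hFmem j hj, hmw, weightsB_getD n miss[j] (hsub miss[j] (by simp))]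
      by_cases hb : x.testBit j <;> simp [hb]
    rw [this]

theorem compat_fill (L cur : List String) (x : Nat) (hc : Compat L cur) :
    Compat L (fillA cur (starsOf L) x) := by
  obtain ⟨hlen, hoff⟩ := hc
  constructor
  · rw [fillA, setFold_length, hlen]
  · intro i hi
    rw [fillA, setFold_getD_not_mem x _ 0 cur i hi]
    exact hoff i hi

theorem inner_eq (N : List String) (Mint : Int) (xs : List Nat) (Ncur : List String)
    (hc : Compat N Ncur) :
    (innerA Mint (starsOf N) xs Ncur).1 =
      (if xs.any (fun x => PySem.Int.mod Mint (fvB N x) = 0) then some Mint else none) ∧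
    Compat N (innerA Mint (starsOf N) xs Ncur).2 := by
  induction xs generalizing Ncur with
  | nil => exact ⟨by simp [innerA], hc⟩
  | cons x xs ih =>
    have hval := fillVal N Ncur x hc
    have hcf := compat_fill N Ncur x hc
    by_cases h : PySem.Int.mod Mint (fvB N x) = 0
    · constructor
      · simp [innerA, hval, h]
      · simp [innerA, hval, h, hcf]
    · have hne : ¬ PySem.Int.mod Mint (pyToInt (fillA Ncur (starsOf N) x)) = 0 := by
        rw [hval]; exact h
      simp only [innerA, List.any_cons]
      rw [if_neg hne]
      obtain ⟨ha, hb⟩ := ih (fillA Ncur (starsOf N) x) hcf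
      refine ⟨?_, hb⟩
      rw [ha]
      simp [h]

theorem valsB_any (N : List String) (Mint : Int) :
    (valsB N).any (fun n => PySem.Int.mod Mint n = 0)
      = (List.range (2 ^ (mwB N).length)).any (fun x => PySem.Int.mod Mint (fvB N x) = 0) := by
  rw [valsB, List.any_map]
  rfl

theorem mwB_len_stars (L : List String) : (mwB L).length = (starsOf L).length := by
  rw [mwB_eq]; simp

theorem outer_eq (M N : List String) (xs : List Nat) (Mcur Ncur : List String)
    (hM : Compat M Mcur) (hN : Compat N Ncur) :
    outerA (starsOf M) (starsOf N) xs Mcur Ncur = firstHit (valsB N) (xs.map (fvB M)) := by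
  induction xs generalizing Mcur Ncur with
  | nil => rfl
  | cons x xs ih =>
    simp only [outerA, List.map_cons, firstHit]
    rw [fillVal M Mcur x hM]
    obtain ⟨h1, h2⟩ := inner_eq N (fvB M x)
      (List.range (2 ^ (starsOf N).length)) Ncur hN
    rw [valsB_any, mwB_len_stars]
    by_cases hany : (List.range (2 ^ (starsOf N).length)).any
        (fun y => PySem.Int.mod (fvB M x) (fvB N y) = 0)
    · rw [if_pos hany]
      rw [if_pos hany] at h1
      rcases hres : innerA (fvB M x) (starsOf N) (List.range (2 ^ (starsOf N).length)) Ncur with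
        ⟨o, N'⟩
      rw [hres] at h1
      simp at h1
      simp [h1]
    · rw [if_neg hany]
      rw [if_neg hany] at h1
      rcases hres : innerA (fvB M x) (starsOf N) (List.range (2 ^ (starsOf N).length)) Ncur with
        ⟨o, N'⟩
      rw [hres] at h1 h2
      simp at h1
      subst h1
      exact ih (fillA Mcur (starsOf M) x) N' (compat_fill M Mcur x hM) h2

theorem solve_eq_firstHit (M N : List String) :
    solve M N = firstHit (valsB N) (valsB M) := by
  rw [solve,
    outer_eq M N _ M N ⟨rfl, fun _ _ => rfl⟩ ⟨rfl, fun _ _ => rfl⟩]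
  rw [show valsB M = (List.range (2 ^ (mwB M).length)).map (fvB M) from rfl, mwB_len_stars]

-- ---------- part 2: B computes the same first hit ----------

-- S ws x = the subset sum of the weights ws selected by the bits of x
def S : List Int → Nat → Int
  | [], _ => 0
  | w :: ws, x => (if x % 2 = 1 then w else 0) + S ws (x / 2)

theorem S_zero (ws : List Int) : S ws 0 = 0 := by
  induction ws with
  | nil => rfl
  | cons w ws ih => simp [S, ih]

theorem sum_filter_eq_S (ws : List Int) : ∀ x : Nat,
    (((List.range ws.length).filter (fun j => x.testBit j)).map (fun j => ws.getD j 0)).sum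
      = S ws x := by
  induction ws with
  | nil => intro x; simp [S]
  | cons w ws ih =>
    intro x
    rw [S, ← ih (x / 2)]
    rw [List.length_cons, List.range_succ_eq_map, List.filter_cons]
    have hmap : ((List.range ws.length).map Nat.succ).filter (fun j => x.testBit j)
        = ((List.range ws.length).filter (fun j => (x / 2).testBit j)).map Nat.succ := by
      rw [List.filter_map]
      congr 1
      apply List.filter_congr
      intro j _
      simp [Function.comp, Nat.testBit_add_one]
    by_cases h0 : x % 2 = 1
    · rw [if_pos (by simpa [Nat.testBit_zero] using h0), if_pos h0]
      simp only [List.map_cons, List.sum_cons, hmap, List.map_map]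
      congr 1
    · rw [if_neg (by simpa [Nat.testBit_zero] using h0), if_neg h0]
      simp only [hmap, List.map_map]
      rw [zero_add]
      apply congrArg List.sum
      apply List.map_congr_left
      intro j _
      simp [Function.comp]
  
theorem fvB_eq_S (L : List String) (x : Nat) : fvB L x = baseB L + S (mwB L) x := by
  rw [fvB, sum_filter_eq_S]

theorem partsB_fold (n : Nat) (l : List (String × Nat)) : ∀ (a : Int) (b : List Int),
    l.foldl (fun p q =>
      let w : Int := 2 ^ (n - 1 - q.2)
      if q.1 = "1" then (p.1 + w, p.2)
      else if q.1 = "*" then (p.1, p.2 ++ [w]) else p) (a, b)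
    = (a + ((l.filter (fun q => q.1 = "1")).map (fun q => (2:Int) ^ (n - 1 - q.2))).sum,
       b ++ (l.filter (fun q => q.1 = "*")).map (fun q => (2:Int) ^ (n - 1 - q.2))) := by
  induction l with
  | nil => intro a b; simp
  | cons q l ih =>
    intro a b
    simp only [List.foldl_cons, List.filter_cons]
    by_cases h1 : q.1 = "1"
    · rw [if_pos h1, ih]
      simp [h1, add_assoc]
    · by_cases h2 : q.1 = "*"
      · rw [if_neg h1, if_pos h2, ih]
        simp [h2]
      · rw [if_neg h1, if_neg h2, ih]
        simp [h1, h2]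

theorem partsB_eq (L : List String) : partsB L = (baseB L, mwB L) := by
  rw [partsB, partsB_fold L.length L.zipIdx 0 []]
  have hw : ∀ (s : String), (L.zipIdx.filter (fun q => q.1 = s)).map
        (fun q => (2:Int) ^ (L.length - 1 - q.2))
      = (L.zipIdx.filter (fun q => q.1 = s)).map
        (fun p => (weightsB L.length).getD p.2 0) := by
    intro s
    apply List.map_congr_left
    intro p hp
    have hmem := List.mem_zipIdx (List.mem_of_mem_filter hp)
    rw [weightsB_getD L.length p.2 (by omega)]
  rw [hw, hw]
  simp [baseB, mwB]

theorem listRange_two_mul (m : Nat) :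
    List.range (2 * m) = (List.range m).flatMap (fun y => [2*y, 2*y+1]) := by
  induction m with
  | zero => simp
  | succ m ih =>
    rw [show 2*(m+1) = (2*m+1)+1 by ring, List.range_succ, List.range_succ,
      List.range_succ (n := m), List.flatMap_append, ← ih]
    simp

theorem dbl_eq (ws : List Int) (base : Int) :
    ws.reverse.foldl (fun vs w => vs.flatMap (fun v => [v, v + w])) [base]
      = (List.range (2 ^ ws.length)).map (fun x => base + S ws x) := by
  induction ws with
  | nil => simp [S]
  | cons w ws ih =>
    rw [show (w :: ws).reverse = ws.reverse ++ [w] from by simp, List.foldl_append]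
    simp only [List.foldl_cons, List.foldl_nil]
    rw [ih, List.length_cons, pow_succ, show (2:Nat)^ws.length * 2 = 2 * 2^ws.length by ring,
      listRange_two_mul]
    rw [List.flatMap_map, List.map_flatMap]
    apply List.flatMap_congr
    intro y _
    have e1 : (2*y) % 2 = 0 := by omega
    have e2 : (2*y) / 2 = y := by omega
    have e3 : (2*y+1) % 2 = 1 := by omega
    have e4 : (2*y+1) / 2 = y := by omega
    simp only [List.map_cons, List.map_nil, S, e1, e2, e3, e4]
    norm_num
    ring

-- ----- the residue DP of min_x -----

-- the fill indices y < 2^j whose partial value has residue r mod n, in increasing order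
def cands (mw : List Int) (n : Int) (j : Nat) (r : Int) : List Nat :=
  (List.range (2 ^ j)).filter (fun y => PySem.Int.mod (S mw y) n = r)

-- dp after j rounds: keys are unique canonical residues, each mapping to the FIRST
-- (= minimal) fill index with that residue
def DPInv (mw : List Int) (n : Int) (j : Nat) (dp : PySem.Dict Int Nat) : Prop :=
  dp.keys.Nodup ∧ ∀ r : Int, dp.get? r =
    if PySem.Int.mod r n = r then (cands mw n j r).head? else none

theorem mod_idem (n a : Int) (hn : 0 < n) :
    PySem.Int.mod (PySem.Int.mod a n) n = PySem.Int.mod a n := by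
  rw [PySem.Int.mod_eq_emod_of_pos hn, PySem.Int.mod_eq_emod_of_pos hn,
    Int.emod_emod_of_dvd a (dvd_refl n)]

theorem mod_shift (n r w s : Int) (hn : 0 < n) (hr : PySem.Int.mod r n = r) :
    PySem.Int.mod (w + s) n = r ↔ PySem.Int.mod s n = PySem.Int.mod (r - w) n := by
  rw [PySem.Int.mod_eq_emod_of_pos hn, PySem.Int.mod_eq_emod_of_pos hn,
    PySem.Int.mod_eq_emod_of_pos hn]
  rw [PySem.Int.mod_eq_emod_of_pos hn] at hr
  constructor
  · intro h
    have h2 : w + s ≡ r [ZMOD n] := by rw [Int.ModEq, h, hr]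
    have h3 : w + s - w ≡ r - w [ZMOD n] := Int.ModEq.sub_right w h2
    simpa using h3
  · intro h
    have h2 : s ≡ r - w [ZMOD n] := h
    have h3 : w + s ≡ w + (r - w) [ZMOD n] := Int.ModEq.add_left w h2
    rw [show w + (r - w) = r by ring] at h3
    rw [Int.ModEq] at h3
    rw [h3, hr]

theorem mod_inj (n r1 r2 w : Int) (hn : 0 < n) (h1 : PySem.Int.mod r1 n = r1)
    (h2 : PySem.Int.mod r2 n = r2)
    (h : PySem.Int.mod (r1 + w) n = PySem.Int.mod (r2 + w) n) : r1 = r2 := by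
  rw [PySem.Int.mod_eq_emod_of_pos hn, PySem.Int.mod_eq_emod_of_pos hn] at h
  rw [PySem.Int.mod_eq_emod_of_pos hn] at h1 h2
  have h3 : r1 + w ≡ r2 + w [ZMOD n] := h
  have h4 : r1 ≡ r2 [ZMOD n] := Int.ModEq.add_right_cancel (Int.ModEq.refl w) h3
  rw [Int.ModEq, h1, h2] at h4
  exact h4

theorem mod_target (n t w : Int) (hn : 0 < n) (ht : PySem.Int.mod t n = t) :
    PySem.Int.mod (PySem.Int.mod (t - w) n + w) n = t := by
  rw [PySem.Int.mod_eq_emod_of_pos hn, PySem.Int.mod_eq_emod_of_pos hn]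
  rw [PySem.Int.mod_eq_emod_of_pos hn] at ht
  have h1 : (t - w) % n + w ≡ (t - w) + w [ZMOD n] := Int.ModEq.add_right w (Int.emod_emod_of_dvd _ (dvd_refl n))
  rw [show t - w + w = t by ring] at h1
  rw [Int.ModEq] at h1
  rw [h1, ht]

theorem mem_cands (mw : List Int) (n : Int) (j : Nat) (r : Int) (y : Nat) :
    y ∈ cands mw n j r ↔ y < 2 ^ j ∧ PySem.Int.mod (S mw y) n = r := by
  simp [cands]

theorem S_add_pow (j : Nat) : ∀ (mw : List Int) (z : Nat), z < 2 ^ j →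
    S mw (2 ^ j + z) = mw.getD j 0 + S mw z := by
  induction j with
  | zero =>
    intro mw z hz
    interval_cases z
    cases mw with
    | nil => simp [S]
    | cons w ws => simp [S, S_zero]
  | succ j ih =>
    intro mw z hz
    cases mw with
    | nil => simp [S]
    | cons w ws =>
      have e1 : (2 ^ (j+1) + z) % 2 = z % 2 := by
        have : (2:Nat) ^ (j+1) = 2 * 2 ^ j := by ring
        omega
      have e2 : (2 ^ (j+1) + z) / 2 = 2 ^ j + z / 2 := by
        have : (2:Nat) ^ (j+1) = 2 * 2 ^ j := by ring
        omega
      have hz2 : z / 2 < 2 ^ j := by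
        have : (2:Nat) ^ (j+1) = 2 * 2 ^ j := by ring
        omega
      rw [S, e1, e2, ih ws (z / 2) hz2]
      rw [show S (w :: ws) z = (if z % 2 = 1 then w else 0) + S ws (z / 2) from rfl]
      simp only [List.getD_cons_succ]
      ring

theorem cands_succ (mw : List Int) (n : Int) (j : Nat) (r : Int) (hn : 0 < n)
    (hr : PySem.Int.mod r n = r) :
    cands mw n (j+1) r = cands mw n j r
      ++ (cands mw n j (PySem.Int.mod (r - mw.getD j 0) n)).map (fun z => 2 ^ j + z) := by
  rw [cands, show (2:Nat) ^ (j+1) = 2 ^ j + 2 ^ j by ring, List.range_add, List.filter_append]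
  congr 1
  rw [List.filter_map, cands]
  congr 1
  apply List.filter_congr
  intro z hz
  rw [List.mem_range] at hz
  simp only [Function.comp]
  rw [S_add_pow j mw z hz]
  exact decide_eq_decide.mpr (mod_shift n r (mw.getD j 0) (S mw z) hn hr)

-- the body of minxStep's foldl, named for the proofs
def Fstep (n : Int) (j : Nat) (w : Int) (ndp : PySem.Dict Int Nat) (rx : Int × Nat) :
    PySem.Dict Int Nat :=
  match ndp.get? (PySem.Int.mod (rx.1 + w) n) with
  | none => ndp.insert (PySem.Int.mod (rx.1 + w) n) (rx.2 + 2 ^ j)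
  | some old => if rx.2 + 2 ^ j < old then
      ndp.insert (PySem.Int.mod (rx.1 + w) n) (rx.2 + 2 ^ j) else ndp

theorem minxStep_eq (n : Int) (dp : PySem.Dict Int Nat) (j : Nat) (w : Int) :
    minxStep n dp j w = dp.items.foldl (Fstep n j w) dp := rfl

theorem Fstep_keys_nodup (n : Int) (j : Nat) (w : Int) (acc : PySem.Dict Int Nat)
    (p : Int × Nat) (h : acc.keys.Nodup) : (Fstep n j w acc p).keys.Nodup := by
  unfold Fstep
  cases hg : acc.get? (PySem.Int.mod (p.1 + w) n) with
  | none => exact PySem.Dict.nodup_keys_insert _ _ _ h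
  | some old =>
    dsimp only
    split_ifs
    · exact PySem.Dict.nodup_keys_insert _ _ _ h
    · exact h

theorem foldF_keys_nodup (n : Int) (j : Nat) (w : Int) (ps : List (Int × Nat)) :
    ∀ (acc : PySem.Dict Int Nat), acc.keys.Nodup → (ps.foldl (Fstep n j w) acc).keys.Nodup := by
  induction ps with
  | nil => intro acc h; exact h
  | cons p ps ih =>
    intro acc h
    rw [List.foldl_cons]
    exact ih _ (Fstep_keys_nodup n j w acc p h)

theorem Fstep_get_ne (n : Int) (j : Nat) (w : Int) (acc : PySem.Dict Int Nat)
    (rx : Int × Nat) (t : Int) (ht : PySem.Int.mod (rx.1 + w) n ≠ t) :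
    (Fstep n j w acc rx).get? t = acc.get? t := by
  unfold Fstep
  cases hg : acc.get? (PySem.Int.mod (rx.1 + w) n) with
  | none => exact PySem.Dict.get?_insert_of_ne _ _ (Ne.symm ht)
  | some old =>
    dsimp only
    split_ifs
    · exact PySem.Dict.get?_insert_of_ne _ _ (Ne.symm ht)
    · rfl

theorem foldF_untouched (n : Int) (j : Nat) (w : Int) (ps : List (Int × Nat)) :
    ∀ (acc : PySem.Dict Int Nat) (t : Int), (∀ p ∈ ps, PySem.Int.mod (p.1 + w) n ≠ t) →
    (ps.foldl (Fstep n j w) acc).get? t = acc.get? t := by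
  induction ps with
  | nil => intro acc t _; rfl
  | cons p ps ih =>
    intro acc t h
    rw [List.foldl_cons, ih _ t (fun q hq => h q (List.mem_cons_of_mem _ hq)),
      Fstep_get_ne n j w acc p t (h p List.mem_cons_self)]

theorem foldF_hit (n : Int) (j : Nat) (w : Int) (ps : List (Int × Nat)) :
    ∀ (acc : PySem.Dict Int Nat) (r : Int) (x : Nat) (t : Int),
    (ps.map (fun p => PySem.Int.mod (p.1 + w) n)).Nodup →
    (r, x) ∈ ps → PySem.Int.mod (r + w) n = t →
    (ps.foldl (Fstep n j w) acc).get? t =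
      (match acc.get? t with
       | none => some (x + 2 ^ j)
       | some old => if x + 2 ^ j < old then some (x + 2 ^ j) else some old) := by
  induction ps with
  | nil => intro _ _ _ _ _ hmem _; simp at hmem
  | cons p ps ih =>
    intro acc r x t hnd hmem ht
    rw [List.map_cons, List.nodup_cons] at hnd
    rw [List.foldl_cons]
    rcases List.mem_cons.mp hmem with heq | htail
    · subst heq
      have htail_ne : ∀ q ∈ ps, PySem.Int.mod (q.1 + w) n ≠ t := by
        intro q hq hqt
        exact hnd.1 (by
          rw [show PySem.Int.mod ((r, x).1 + w) n = t from ht]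
          exact List.mem_map.mpr ⟨q, hq, hqt⟩)
      rw [foldF_untouched n j w ps _ t htail_ne]
      unfold Fstep
      rw [show PySem.Int.mod ((r, x).1 + w) n = t from ht]
      cases hg : acc.get? t with
      | none => simp [PySem.Dict.get?_insert_self]
      | some old =>
        dsimp only
        split_ifs
        · simp [PySem.Dict.get?_insert_self]
        · simp [hg]
    · have hne : PySem.Int.mod (p.1 + w) n ≠ t := by
        intro hpt
        exact hnd.1 (by rw [hpt, ← ht]; exact List.mem_map.mpr ⟨(r, x), htail, rfl⟩)
      rw [ih (Fstep n j w acc p) r x t hnd.2 htail ht,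
        Fstep_get_ne n j w acc p t hne]

theorem dpInv_items (mw : List Int) (n : Int) (j : Nat) (dp : PySem.Dict Int Nat)
    (h : DPInv mw n j dp) :
    ∀ p ∈ dp.items, PySem.Int.mod p.1 n = p.1 ∧ p.2 < 2 ^ j ∧ dp.get? p.1 = some p.2 := by
  intro p hp
  have hg : dp.get? p.1 = some p.2 := PySem.Dict.get?_of_mem_items _ hp h.1
  have hcanon : PySem.Int.mod p.1 n = p.1 := by
    by_contra hc
    rw [h.2 p.1, if_neg hc] at hg
    simp at hg
  refine ⟨hcanon, ?_, hg⟩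
  have hg2 := hg
  rw [h.2 p.1, if_pos hcanon] at hg2
  have hmem : p.2 ∈ cands mw n j p.1 := by
    have := List.mem_of_mem_head? (l := cands mw n j p.1) (a := p.2) (by rw [hg2]; rfl)
    exact this
  exact ((mem_cands mw n j p.1 p.2).mp hmem).1

theorem targets_nodup (mw : List Int) (n : Int) (j : Nat) (dp : PySem.Dict Int Nat)
    (w : Int) (hn : 0 < n) (h : DPInv mw n j dp) :
    (dp.items.map (fun p => PySem.Int.mod (p.1 + w) n)).Nodup := by
  have heq : dp.items.map (fun p => PySem.Int.mod (p.1 + w) n)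
      = dp.keys.map (fun r => PySem.Int.mod (r + w) n) := by
    simp only [PySem.Dict.keys, List.map_map]
    rfl
  rw [heq]
  apply List.Nodup.map_on ?_ h.1
  intro r1 h1 r2 h2 heq2
  have hc1 : PySem.Int.mod r1 n = r1 := by
    by_contra hc
    have := h.2 r1
    rw [if_neg hc] at this
    exact ((PySem.Dict.get?_eq_none_iff_not_mem_keys _ _).mp this) h1
  have hc2 : PySem.Int.mod r2 n = r2 := by
    by_contra hc
    have := h.2 r2
    rw [if_neg hc] at this
    exact ((PySem.Dict.get?_eq_none_iff_not_mem_keys _ _).mp this) h2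
  exact mod_inj n r1 r2 w hn hc1 hc2 heq2

theorem stepInv (mw : List Int) (n : Int) (hn : 0 < n) (j : Nat) (dp : PySem.Dict Int Nat)
    (h : DPInv mw n j dp) : DPInv mw n (j+1) (minxStep n dp j (mw.getD j 0)) := by
  set w := mw.getD j 0 with hw
  rw [minxStep_eq]
  constructor
  · exact foldF_keys_nodup n j w dp.items dp h.1
  · intro t
    by_cases hcanon : PySem.Int.mod t n = t
    · rw [if_pos hcanon, cands_succ mw n j t hn hcanon, ← hw]
      set r' := PySem.Int.mod (t - w) n with hr'
      have hr'c : PySem.Int.mod r' n = r' := mod_idem n (t - w) hn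
      have hr't : PySem.Int.mod (r' + w) n = t := mod_target n t w hn hcanon
      cases hc' : (cands mw n j r').head? with
      | none =>
        have hempty : cands mw n j r' = [] := List.head?_eq_none_iff.mp hc'
        have huntouched : ∀ p ∈ dp.items, PySem.Int.mod (p.1 + w) n ≠ t := by
          intro p hp hpt
          obtain ⟨hpc, _, hpg⟩ := dpInv_items mw n j dp h p hp
          have : p.1 = r' := mod_inj n p.1 r' w hn hpc hr'c (by rw [hpt, hr't])
          rw [this, h.2 r', if_pos hr'c, hc'] at hpg
          simp at hpg
        rw [foldF_untouched n j w dp.items dp t huntouched, h.2 t, if_pos hcanon, hempty]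
        simp
      | some x' =>
        have hgr' : dp.get? r' = some x' := by rw [h.2 r', if_pos hr'c, hc']
        have hitem : (r', x') ∈ dp.items := PySem.Dict.mem_items_of_get?_eq_some _ hgr'
        rw [foldF_hit n j w dp.items dp r' x' t
          (targets_nodup mw n j dp w hn h) hitem hr't, h.2 t, if_pos hcanon]
        cases hct : (cands mw n j t).head? with
        | none =>
          have hempty : cands mw n j t = [] := List.head?_eq_none_iff.mp hct
          rw [hempty]
          simp [hc', Nat.add_comm]
        | some old =>
          have hmem : old ∈ cands mw n j t := by
            have := List.mem_of_mem_head? (l := cands mw n j t) (a := old) (by rw [hct]; rfl)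
            exact this
          have hbound : old < 2 ^ j := ((mem_cands mw n j t old).mp hmem).1
          dsimp only
          rw [if_neg (by omega)]
          rw [List.head?_append, hct]
          rfl
    · rw [if_neg hcanon]
      have huntouched : ∀ p ∈ dp.items, PySem.Int.mod (p.1 + w) n ≠ t := by
        intro p hp hpt
        exact hcanon (by rw [← hpt]; exact mod_idem n (p.1 + w) hn)
      rw [foldF_untouched n j w dp.items dp t huntouched, h.2 t, if_neg hcanon]

theorem initInv (mw : List Int) (n : Int) (hn : 0 < n) :
    DPInv mw n 0 (PySem.Dict.empty.insert 0 0) := by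
  constructor
  · exact PySem.Dict.nodup_keys_insert _ _ _ (PySem.Dict.nodup_keys_empty)
  · intro r
    have hmod0 : PySem.Int.mod 0 n = 0 := by
      rw [PySem.Int.mod_eq_emod_of_pos hn]; exact Int.zero_emod n
    have hcands : cands mw n 0 r = if r = 0 then [0] else [] := by
      rw [cands, pow_zero, List.range_one]
      by_cases hr : r = 0
      · subst hr
        simp [S_zero, hmod0]
      · simp [S_zero, hmod0, Ne.symm hr]
        exact hr
    rw [PySem.Dict.get?_insert, hcands]
    by_cases hr : r = 0
    · subst hr
      simp [hmod0]
    · rw [if_neg hr]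
      by_cases hc : PySem.Int.mod r n = r
      · rw [if_pos hc, if_neg hr]
        simp [PySem.Dict.get?_empty]
      · rw [if_neg hc]
        simp [PySem.Dict.get?_empty]

theorem loopInv (mw : List Int) (n : Int) (hn : 0 < n) : ∀ (fuel k : Nat),
    k + fuel = mw.length → ∀ dp, DPInv mw n k dp →
    DPInv mw n mw.length
      ((mw.zipIdx.drop k).foldl (fun dp q => minxStep n dp q.2 q.1) dp) := by
  intro fuel
  induction fuel with
  | zero =>
    intro k hk dp h
    rw [List.drop_of_length_le (by simp; omega)]
    simpa [show k = mw.length by omega] using h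
  | succ f ih =>
    intro k hk dp h
    have hklt : k < mw.length := by omega
    have hkz : k < mw.zipIdx.length := by simpa using hklt
    rw [List.drop_eq_getElem_cons hkz, List.foldl_cons]
    have hget : mw.zipIdx[k]'hkz = (mw[k]'hklt, k) := by simp [List.getElem_zipIdx]
    rw [hget]
    have hgd : mw[k]'hklt = mw.getD k 0 := by
      rw [List.getD_eq_getElem?_getD, List.getElem?_eq_getElem hklt]; rfl
    have hstep := stepInv mw n hn k dp h
    rw [← hgd] at hstep
    exact ih (k+1) (by omega) _ hstep

theorem mod_zero_shift (n base s : Int) (hn : 0 < n) :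
    PySem.Int.mod (base + s) n = 0 ↔ PySem.Int.mod s n = PySem.Int.mod (-base) n := by
  have h := mod_shift n 0 base s hn
    (by rw [PySem.Int.mod_eq_emod_of_pos hn]; exact Int.zero_emod n)
  rw [zero_sub] at h
  exact h

theorem minxB_eq (base : Int) (mw : List Int) (n : Int) (hn : 0 < n) :
    minxB base mw n = ((List.range (2 ^ mw.length)).filter
      (fun y => PySem.Int.mod (base + S mw y) n = 0)).head? := by
  rw [minxB]
  have hinv := loopInv mw n hn mw.length 0 (by omega) _ (initInv mw n hn)
  rw [List.drop_zero] at hinv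
  rw [hinv.2 (PySem.Int.mod (-base) n), if_pos (mod_idem n (-base) hn)]
  rw [cands]
  congr 1
  apply List.filter_congr
  intro y _
  exact decide_eq_decide.mpr (mod_zero_shift n base (S mw y) hn).symm

-- ----- the global minimum over all divisors -----

-- o is the least y < m satisfying p (none = no such y)
def LeastOpt (p : Nat → Bool) (m : Nat) (o : Option Nat) : Prop :=
  (o = none → ∀ y, y < m → p y ≠ true) ∧
  (∀ x, o = some x → x < m ∧ p x = true ∧ ∀ z, z < x → p z ≠ true)

theorem head_filter_least (p : Nat → Bool) (m : Nat) :
    LeastOpt p m (((List.range m).filter p).head?) := by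
  induction m with
  | zero => exact ⟨fun _ y hy => by omega, fun x hx => by simp at hx⟩
  | succ m ih =>
    rw [List.range_succ, List.filter_append]
    cases hh : ((List.range m).filter p).head? with
    | none =>
      have hemp : (List.range m).filter p = [] := List.head?_eq_none_iff.mp hh
      have hall : ∀ y, y < m → p y ≠ true := (hh ▸ ih).1 rfl
      rw [hemp, List.nil_append]
      by_cases hm : p m
      · refine ⟨fun hc => by simp [hm] at hc, fun x hx => ?_⟩
        simp [hm] at hx
        subst hx
        exact ⟨by omega, hm, fun z hz => hall z hz⟩
      · refine ⟨fun _ y hy => ?_, fun x hx => ?_⟩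
        · rcases Nat.lt_succ_iff_lt_or_eq.mp hy with h | h
          · exact hall y h
          · subst h; simpa using hm
        · simp [hm] at hx
    | some x =>
      rw [List.head?_append, hh]
      obtain ⟨hxm, hpx, hleast⟩ := (hh ▸ ih).2 x rfl
      exact ⟨fun hc => by simp at hc,
        fun x' hx' => by
          rw [Option.some_or] at hx'
          cases hx'
          exact ⟨by omega, hpx, hleast⟩⟩

-- the combining step of B's 'best' loop
def optMin (o1 o2 : Option Nat) : Option Nat :=
  match o2 with
  | none => o1
  | some x =>
    match o1 with
    | none => some x
    | some b0 => if x < b0 then some x else some b0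

theorem leastOpt_or (p q : Nat → Bool) (m : Nat) (o1 o2 : Option Nat)
    (h1 : LeastOpt p m o1) (h2 : LeastOpt q m o2) :
    LeastOpt (fun y => p y || q y) m (optMin o1 o2) := by
  unfold optMin
  cases o2 with
  | none =>
    refine ⟨fun ho y hy => ?_, fun x hx => ?_⟩
    · have := h1.1 ho y hy
      have := h2.1 rfl y hy
      simp_all
    · obtain ⟨hxm, hpx, hleast⟩ := h1.2 x hx
      refine ⟨hxm, by simp [hpx], fun z hz => ?_⟩
      have := hleast z hz
      have := h2.1 rfl z (by omega)
      simp_all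
  | some x =>
    obtain ⟨hxm, hqx, hqleast⟩ := h2.2 x rfl
    cases o1 with
    | none =>
      refine ⟨fun ho => by simp at ho, fun x' hx' => ?_⟩
      cases hx'
      refine ⟨hxm, by simp [hqx], fun z hz => ?_⟩
      have := hqleast z hz
      have := h1.1 rfl z (by omega)
      simp_all
    | some b0 =>
      obtain ⟨hbm, hpb, hpleast⟩ := h1.2 b0 rfl
      dsimp only
      by_cases hlt : x < b0
      · rw [if_pos hlt]
        refine ⟨fun ho => by simp at ho, fun x' hx' => ?_⟩
        cases hx'
        refine ⟨hxm, by simp [hqx], fun z hz => ?_⟩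
        have := hqleast z hz
        have := hpleast z (by omega)
        simp_all
      · rw [if_neg hlt]
        refine ⟨fun ho => by simp at ho, fun x' hx' => ?_⟩
        cases hx'
        refine ⟨hbm, by simp [hpb], fun z hz => ?_⟩
        have := hpleast z hz
        have := hqleast z (by omega)
        simp_all

theorem leastOpt_congr (p p' : Nat → Bool) (m : Nat) (o : Option Nat)
    (h : ∀ y, p y = p' y) (ho : LeastOpt p m o) : LeastOpt p' m o := by
  have : p = p' := funext h
  exact this ▸ ho

theorem fold_least (m : Nat) (mins : Int → Option Nat) (Q : Int → Nat → Bool)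
    (l : List Int) (hQ : ∀ nn ∈ l, LeastOpt (Q nn) m (mins nn)) :
    ∀ (b : Option Nat) (p : Nat → Bool), LeastOpt p m b →
    LeastOpt (fun y => p y || l.any (fun nn => Q nn y)) m
      (l.foldl (fun b nn =>
        match mins nn with
        | none => b
        | some x =>
          match b with
          | none => some x
          | some b0 => if x < b0 then some x else some b0) b) := by
  induction l with
  | nil =>
    intro b p hb
    exact leastOpt_congr p _ m b (fun y => by simp) hb
  | cons nn l ih =>
    intro b p hb
    rw [List.foldl_cons]
    have hstep := leastOpt_or p (Q nn) m b (mins nn) hb (hQ nn List.mem_cons_self)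
    have := ih (fun n2 h2 => hQ n2 (List.mem_cons_of_mem _ h2)) _ _ hstep
    exact leastOpt_congr _ _ m _ (fun y => by simp [Bool.or_assoc]) this

-- ----- the first hit of A's enumeration is the value at that least index -----

theorem firstHit_map (D : List Int) (g : Nat → Int) (l : List Nat) :
    firstHit D (l.map g) =
      (match l.find? (fun y => D.any (fun nn => PySem.Int.mod (g y) nn = 0)) with
       | some y => g y
       | none => 0) := by
  induction l with
  | nil => rfl
  | cons y l ih =>
    rw [List.map_cons, firstHit, List.find?_cons]
    by_cases h : D.any (fun nn => PySem.Int.mod (g y) nn = 0)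
    · rw [if_pos h]
      simp [h]
    · rw [if_neg h]
      simp only [Bool.not_eq_true] at h
      simp [h, ih]

theorem find_range_least (p : Nat → Bool) (m x0 : Nat) (h : LeastOpt p m (some x0)) :
    (List.range m).find? p = some x0 := by
  obtain ⟨hx0m, hpx0, hleast⟩ := h.2 x0 rfl
  rw [show m = x0 + (m - x0) from by omega, List.range_add, List.find?_append]
  have h1 : (List.range x0).find? p = none := by
    rw [List.find?_eq_none]
    intro y hy
    rw [List.mem_range] at hy
    exact hleast y hy
  rw [h1, Option.none_or, List.find?_map, show m - x0 = (m - x0 - 1) + 1 from by omega,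
    List.range_succ_eq_map, List.find?_cons_of_pos (by simpa using hpx0)]
  simp

-- ----- positivity of the N fill values under Pre_solve -----

theorem weightsB_getD_nonneg (n i : Nat) : 0 ≤ (weightsB n).getD i 0 := by
  by_cases hi : i < n
  · rw [weightsB_getD n i hi]; positivity
  · rw [List.getD_eq_getElem?_getD, List.getElem?_eq_none (by simp [weightsB]; omega)]
    simp

theorem S_nonneg (ws : List Int) (h : ∀ w ∈ ws, 0 ≤ w) : ∀ x : Nat, 0 ≤ S ws x := by
  induction ws with
  | nil => intro x; simp [S]
  | cons w ws ih =>
    intro x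
    rw [S]
    have h1 : 0 ≤ w := h w List.mem_cons_self
    have h2 := ih (fun v hv => h v (List.mem_cons_of_mem _ hv)) (x / 2)
    split_ifs <;> omega

theorem mwB_nonneg (L : List String) : ∀ w ∈ mwB L, 0 ≤ w := by
  intro w hw
  rw [mwB] at hw
  obtain ⟨p, _, rfl⟩ := List.mem_map.mp hw
  exact weightsB_getD_nonneg L.length p.2

theorem baseB_pos (L : List String) (h : "1" ∈ L) : 0 < baseB L := by
  obtain ⟨i, hi, hLi⟩ := List.mem_iff_getElem.mp h
  have hipos : i ∈ posList L "1" := by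
    rw [mem_posList]
    refine ⟨hi, ?_⟩
    rw [List.getD_eq_getElem?_getD, List.getElem?_eq_getElem hi, hLi]
    rfl
  rw [baseB_eq]
  apply List.sum_pos
  · intro x hx
    obtain ⟨p, hp, rfl⟩ := List.mem_map.mp hx
    rw [weightsB_getD L.length p ((mem_posList L "1" p).mp hp).1]
    positivity
  · intro hc
    rw [List.map_eq_nil_iff] at hc
    rw [hc] at hipos
    simp at hipos
    
theorem vals_pos (N : List String) (h : "1" ∈ N) : ∀ n ∈ valsB N, 0 < n := by
  intro n hn
  rw [valsB] at hn
  obtain ⟨x, _, rfl⟩ := List.mem_map.mp hn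
  rw [fvB_eq_S]
  have h1 := baseB_pos N h
  have h2 := S_nonneg (mwB N) (mwB_nonneg N) x
  omega

-- ----- B's final value reconstruction -----

theorem zipfold_eq (ws : List Int) : ∀ (k : Nat) (a : Int) (x : Nat),
    (ws.zipIdx k).foldl (fun v q => if x.testBit q.2 then v + q.1 else v) a
      = a + S ws (x >>> k) := by
  induction ws with
  | nil => intro k a x; simp [S]
  | cons w ws ih =>
    intro k a x
    rw [List.zipIdx_cons, List.foldl_cons, ih (k+1)]
    have e1 : x.testBit k = decide ((x >>> k) % 2 = 1) := by
      rw [Nat.testBit_eq_decide_div_mod_eq, Nat.shiftRight_eq_div_pow]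
    have e2 : x >>> (k+1) = (x >>> k) / 2 := by
      rw [Nat.shiftRight_succ]
    rw [e2, show S (w :: ws) (x >>> k)
      = (if (x >>> k) % 2 = 1 then w else 0) + S ws ((x >>> k) / 2) from rfl]
    by_cases hb : (x >>> k) % 2 = 1
    · simp [e1, hb]
      ring
    · simp [e1, hb]

theorem solve_alt_eq (M N : List String) :
    solve_alt M N =
      (match (valsB N).foldl (fun b n => optMin b (minxB (baseB M) (mwB M) n)) none with
       | none => 0
       | some x => (mwB M).zipIdx.foldl
           (fun v q => if x.testBit q.2 then v + q.1 else v) (baseB M)) := by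
  unfold solve_alt
  simp only [partsB_eq]
  have hN : (mwB N).reverse.foldl (fun vs w => vs.flatMap (fun v => [v, v + w])) [baseB N]
      = valsB N := by
    rw [dbl_eq, valsB]
    apply List.map_congr_left
    intro x _
    rw [fvB_eq_S]
  rw [hN]
  rfl

-- ===== VERDICT (by name: the statement is the Claim_ definition above) =====
theorem solve_spec : Claim_equal_solve := by
  intro M N _ hPre
  unfold Spec_solve
  obtain ⟨h1, hex⟩ := hPre
  rw [solve_eq_firstHit, solve_alt_eq]
  have hQ : ∀ nn ∈ valsB N, LeastOpt (fun y => decide (PySem.Int.mod (fvB M y) nn = 0))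
      (2 ^ (mwB M).length) (minxB (baseB M) (mwB M) nn) := by
    intro nn hnn
    have hpos := vals_pos N h1 nn hnn
    rw [minxB_eq (baseB M) (mwB M) nn hpos]
    have heq : (fun y => decide (PySem.Int.mod (baseB M + S (mwB M) y) nn = 0))
        = (fun y => decide (PySem.Int.mod (fvB M y) nn = 0)) := by
      funext y; rw [fvB_eq_S]
    exact heq ▸ head_filter_least _ (2 ^ (mwB M).length)
  have hfold := fold_least (2 ^ (mwB M).length) (minxB (baseB M) (mwB M))
    (fun nn y => decide (PySem.Int.mod (fvB M y) nn = 0)) (valsB N) hQ none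
    (fun _ => false) ⟨fun _ y _ => by simp, fun x hx => by simp at hx⟩
  have hbest : LeastOpt
      (fun y => (valsB N).any (fun nn => PySem.Int.mod (fvB M y) nn = 0))
      (2 ^ (mwB M).length)
      ((valsB N).foldl (fun b n => optMin b (minxB (baseB M) (mwB M) n)) none) := by
    exact leastOpt_congr _ _ _ _ (fun y => by simp) hfold
  have hex2 : ∃ y, y < 2 ^ (mwB M).length ∧
      ((valsB N).any (fun nn => PySem.Int.mod (fvB M y) nn = 0)) = true := by
    obtain ⟨mm, hmm, nn, hnn, hdvd⟩ := hex
    rw [valsB] at hmm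
    obtain ⟨y, hy, rfl⟩ := List.mem_map.mp hmm
    rw [List.mem_range] at hy
    refine ⟨y, hy, ?_⟩
    simp only [List.any_eq_true]
    exact ⟨nn, hnn, by
      simpa using (PySem.Int.mod_eq_zero_iff_dvd (fvB M y) nn).mpr hdvd⟩
  cases hb : (valsB N).foldl (fun b n => optMin b (minxB (baseB M) (mwB M) n)) none with
  | none =>
    exfalso
    obtain ⟨y, hy, hpy⟩ := hex2
    exact (hb ▸ hbest).1 rfl y hy hpy
  | some x0 =>
    dsimp only
    rw [show valsB M = (List.range (2 ^ (mwB M).length)).map (fvB M) from rfl]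
    rw [firstHit_map]
    have hfind : (List.range (2 ^ (mwB M).length)).find?
        (fun y => (valsB N).any (fun nn => PySem.Int.mod (fvB M y) nn = 0)) = some x0 :=
      find_range_least _ _ _ (hb ▸ hbest)
    rw [hfind]
    dsimp only
    rw [zipfold_eq (mwB M) 0 (baseB M) x0, Nat.shiftRight_zero, fvB_eq_S]
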